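-- pv_equiv track=rewrite | github.com/zohaiblaghari/Assignment-11 | time-management3.py | find_common_time
-- ===== SOURCE A (Python) =====
-- def find_common_time(availabilities):
--     common_times = []
--     for time_slot in range(24):
--         available = True
--         for availability in availabilities:
--             if time_slot not in availability:
--                 available = False
--                 break
--         if available:
--             common_times.append(time_slot)
--     return common_times
-- ===== SOURCE B (Python) =====
-- def find_common_time(availabilities):
--     return sorted(set(range(24)).intersection(*map(set, availabilities)))
-- ===== Notes on version B (the rewrite author's own statement) =====
-- stated objective: idiomatic
-- what changed: Replaces the 24-slot scan with nested membership loops by a single fold of set intersection over the availabilities followed by a sort.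
import Mathlib
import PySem

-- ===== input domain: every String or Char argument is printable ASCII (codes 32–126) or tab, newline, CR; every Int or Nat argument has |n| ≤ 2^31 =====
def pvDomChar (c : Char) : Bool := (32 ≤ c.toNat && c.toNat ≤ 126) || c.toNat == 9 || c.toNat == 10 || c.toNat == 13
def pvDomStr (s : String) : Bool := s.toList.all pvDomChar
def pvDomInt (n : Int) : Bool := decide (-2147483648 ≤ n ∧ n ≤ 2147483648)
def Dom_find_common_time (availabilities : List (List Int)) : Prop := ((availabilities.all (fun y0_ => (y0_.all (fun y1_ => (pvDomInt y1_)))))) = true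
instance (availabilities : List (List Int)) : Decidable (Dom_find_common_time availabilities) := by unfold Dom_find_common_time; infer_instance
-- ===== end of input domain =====

-- B folds set intersection over the availabilities instead of testing each of 24 slots
-- against every availability list; same result, a more idiomatic one-pass reduction.

-- ===== PORT A =====
-- inner 'for availability … break' loop: sets available=False at the first list missing
-- time_slot, i.e. available = all lists contain time_slot
def find_common_time (availabilities : List (List Int)) : List Int :=
  (PySem.List.pyRange 0 24 1).foldl
    (fun common_times time_slot =>
      if availabilities.all (fun availability => availability.contains time_slot)
      then common_times ++ [time_slot] else common_times) []

-- ===== PORT B =====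
def find_common_time_alt (availabilities : List (List Int)) : List Int :=
  PySem.List.sorted
    (availabilities.foldl (fun s a => PySem.Set.inter s (PySem.Set.ofList a))
      (PySem.Set.ofList (PySem.List.pyRange 0 24 1)))
    (fun x => x) false

-- ===== PRECONDITION & SPEC =====
def Spec_find_common_time (availabilities : List (List Int)) (out : List Int) : Prop := out = find_common_time_alt availabilities
instance (availabilities : List (List Int)) (out : List Int) : Decidable (Spec_find_common_time availabilities out) := by unfold Spec_find_common_time; infer_instance

-- ===== CLAIM (what is proved, stated in full; the proofs are below) =====
def Claim_equal_find_common_time : Prop := ∀ (availabilities : List (List Int)), Dom_find_common_time availabilities → Spec_find_common_time availabilities (find_common_time availabilities)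

-- ===== LEMMAS AND PROOFS =====

theorem foldl_inter_eq_filter (av : List (List Int)) (s : List Int) :
    av.foldl (fun s a => PySem.Set.inter s (PySem.Set.ofList a)) s
      = s.filter (fun x => av.all (fun a => a.contains x)) := by
  induction av generalizing s with
  | nil => simp
  | cons a rest ih =>
      simp only [List.foldl_cons, ih, List.all_cons]
      rw [PySem.Set.inter, List.filter_filter]
      apply List.filter_congr
      intro x _
      simp [PySem.Set.mem_ofList, Bool.and_comm]

theorem find_common_time_eq_filter (av : List (List Int)) :
    find_common_time av
      = (PySem.List.pyRange 0 24 1).filter (fun x => av.all (fun a => a.contains x)) := by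
  unfold find_common_time
  rw [PySem.List.foldl_append_if_eq_filter]
  simp

-- ===== VERDICT (by name: the statement is the Claim_ definition above) =====
theorem find_common_time_spec : Claim_equal_find_common_time := by
  intro av _
  show find_common_time av = find_common_time_alt av
  unfold find_common_time_alt
  rw [foldl_inter_eq_filter,
      PySem.Set.ofList_eq_self_of_nodup _ (PySem.List.nodup_pyRange_one 0 24),
      find_common_time_eq_filter,
      PySem.List.sorted_eq_self_of_pairwise]
  exact ((PySem.List.pairwise_lt_pyRange_one 0 24).filter _).imp (fun h => le_of_lt h)
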